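-- pv_equiv track=rewrite | github.com/barteksmolkowski/adventofcode_2024 | Dni 2023/13_dzien.py | RozdzielTab
-- ===== SOURCE A (Python) =====
-- def RozdzielTab(tablice):
--     NoweTablice = []
--     tablica = []
--
--     for rzad in tablice:
--         if rzad.strip(" "):
--             tablica.append(rzad)
--         else:
--             if tablica:
--                 NoweTablice.append(tablica)
--                 tablica = []
--
--     if tablica:
--         NoweTablice.append(tablica)
--
--     return NoweTablice
-- ===== SOURCE B (Python) =====
-- from itertools import groupby
--
--
-- def RozdzielTab(tablice):
--     return [list(g) for k, g in groupby(tablice, key=lambda r: bool(r.strip(" "))) if k]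
-- ===== Notes on version B (the rewrite author's own statement) =====
-- stated objective: idiomatic
-- what changed: Replaces the manual accumulator with its double flush (at the blank-line branch and after the loop) by itertools.groupby keyed on blankness, keeping only the non-blank groups.
import Mathlib
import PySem

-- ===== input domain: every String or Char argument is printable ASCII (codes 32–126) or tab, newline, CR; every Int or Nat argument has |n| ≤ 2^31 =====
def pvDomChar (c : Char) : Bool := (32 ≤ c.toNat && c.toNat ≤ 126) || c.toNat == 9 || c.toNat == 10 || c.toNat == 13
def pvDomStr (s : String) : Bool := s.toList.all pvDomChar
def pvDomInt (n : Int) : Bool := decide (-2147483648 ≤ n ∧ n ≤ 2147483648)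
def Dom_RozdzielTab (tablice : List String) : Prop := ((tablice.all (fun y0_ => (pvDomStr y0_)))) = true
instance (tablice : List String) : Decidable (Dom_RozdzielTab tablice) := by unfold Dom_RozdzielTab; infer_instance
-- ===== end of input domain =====

-- B replaces A's manual accumulator and its two flush sites by a groupby-on-blankness pass keeping the non-blank groups (idiomatic; same cost).

-- ===== PORT A =====
-- truthiness of rzad.strip(" "): non-empty after stripping spaces
def pvNonBlank (r : String) : Bool := !(PySem.Str.stripChars r " " == "")

-- one loop iteration over the state (NoweTablice, tablica)
def pvStepA (st : List (List String) × List String) (rzad : String) :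
    List (List String) × List String :=
  if pvNonBlank rzad then (st.1, st.2 ++ [rzad])
  else if st.2 ≠ [] then (st.1 ++ [st.2], []) else st

def RozdzielTab (tablice : List String) : List (List String) :=
  let st := tablice.foldl pvStepA ([], [])
  if st.2 ≠ [] then st.1 ++ [st.2] else st.1

-- ===== PORT B =====
-- itertools.groupby on key = bool(r.strip(" ")): each step peels one maximal run
-- of equal-key elements (takeWhile/dropWhile); only the key-True runs are kept.
def pvGroups (tablice : List String) : List (List String) :=
  match tablice with
  | [] => []
  | s :: rest =>
    if pvNonBlank s then
      (s :: rest.takeWhile pvNonBlank) :: pvGroups (rest.dropWhile pvNonBlank)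
    else
      pvGroups (rest.dropWhile (fun r => !pvNonBlank r))
  termination_by tablice.length
  decreasing_by
  all_goals
    simp only [List.length_cons]
    exact Nat.lt_succ_of_le (List.length_dropWhile_le _ _)

def RozdzielTab_alt (tablice : List String) : List (List String) := pvGroups tablice

-- ===== PRECONDITION & SPEC =====
def Spec_RozdzielTab (tablice : List String) (out : List (List String)) : Prop := out = RozdzielTab_alt tablice
instance (tablice : List String) (out : List (List String)) : Decidable (Spec_RozdzielTab tablice out) := by unfold Spec_RozdzielTab; infer_instance

-- ===== CLAIM (what is proved, stated in full; the proofs are below) =====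
def Claim_equal_RozdzielTab : Prop := ∀ (tablice : List String), Dom_RozdzielTab tablice → Spec_RozdzielTab tablice (RozdzielTab tablice)

-- ===== LEMMAS AND PROOFS =====

-- A's flush of the final partial group, as a function of the loop state
def pvFinish (st : List (List String) × List String) : List (List String) :=
  if st.2 ≠ [] then st.1 ++ [st.2] else st.1

lemma pvGroups_dropWhile_blank (l : List String) :
    pvGroups (l.dropWhile (fun r => !pvNonBlank r)) = pvGroups l := by
  induction l with
  | nil => simp
  | cons s t ih =>
    by_cases h : pvNonBlank s = true
    · simp [h]
    · simp only [Bool.not_eq_true] at h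
      rw [List.dropWhile_cons]
      simp only [h, Bool.not_false]
      rw [pvGroups]
      simp [h]

-- the loop invariant: from any state, A's remaining loop + flush produces the
-- already-emitted groups, then (the pending group extended by the first run) and B's groups
lemma pvFold_invariant :
    ∀ (l : List String) (NT : List (List String)) (cur : List String),
      pvFinish (l.foldl pvStepA (NT, cur)) =
        if cur = [] then NT ++ pvGroups l
        else NT ++ (cur ++ l.takeWhile pvNonBlank) :: pvGroups (l.dropWhile pvNonBlank) := by
  intro l
  induction l with
  | nil =>
    intro NT cur
    by_cases hc : cur = [] <;> simp [pvFinish, hc, pvGroups]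
  | cons s rest ih =>
    intro NT cur
    by_cases hs : pvNonBlank s = true
    · have hstep : pvStepA (NT, cur) s = (NT, cur ++ [s]) := by simp [pvStepA, hs]
      rw [List.foldl_cons, hstep, ih NT (cur ++ [s])]
      by_cases hc : cur = []
      · subst hc
        simp only [List.nil_append]
        rw [pvGroups]
        simp [hs]
      · simp [hc, hs]
    · simp only [Bool.not_eq_true] at hs
      have hgr : pvGroups (s :: rest) = pvGroups rest := by
        rw [pvGroups]
        simp only [hs, Bool.false_eq_true, if_false]
        exact pvGroups_dropWhile_blank rest
      by_cases hc : cur = []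
      · subst hc
        have hstep : pvStepA (NT, []) s = (NT, []) := by simp [pvStepA, hs]
        rw [List.foldl_cons, hstep, ih NT []]
        simp [hgr]
      · have hstep : pvStepA (NT, cur) s = (NT ++ [cur], []) := by simp [pvStepA, hs, hc]
        rw [List.foldl_cons, hstep, ih (NT ++ [cur]) []]
        simp [hc, hgr, hs]

-- ===== VERDICT (by name: the statement is the Claim_ definition above) =====
theorem RozdzielTab_spec : Claim_equal_RozdzielTab := by
  intro tablice _
  show RozdzielTab tablice = RozdzielTab_alt tablice
  have h := pvFold_invariant tablice [] []
  simpa [RozdzielTab, RozdzielTab_alt, pvFinish] using h
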